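-- pv_equiv track=rewrite | github.com/dengxl0520/leetcode | .lcpr/1049.last-stone-weight-ii.py | lastStoneWeightII1
-- ===== SOURCE A (Python) =====
-- from typing import List
--
-- def lastStoneWeightII1(stones: List[int]) -> int:
--     target = sum(stones)
--     res = target
--
--     dp = [0] * (target+1)
--     for i in range(len(stones)):
--         for j in range(target, stones[i]-1, -1):
--             dp[j] = max(dp[j], dp[j-stones[i]]+stones[i])
--             if target - 2*dp[j] >= 0:
--                 res = min(res, target - 2*dp[j])
--     return res
-- ===== SOURCE B (Python) =====
-- def lastStoneWeightII1(stones):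
--     total = sum(stones)
--     reach = {0}
--     for w in stones:
--         reach |= {s + w for s in reach}
--     best = max(s for s in reach if 2 * s <= total)
--     return total - 2 * best
-- ===== Notes on version B (the rewrite author's own statement) =====
-- stated objective: simpler
-- what changed: Replaces the per-capacity reverse-scan dp array with the min interleaved inside the knapsack update by a set of exactly-reachable subset sums grown once per stone, with the answer extracted in one separate final pass as total - 2*max{s in reach : 2s <= total}; Pre_ restricts to nonnegative stone weights (the problem's natural domain), because on lists containing a negative weight A variously raises IndexError or returns accidental values via an undersized dp array and negative-index wraparound.
-- outside the precondition, e.g. on lastStoneWeightII1([-6, -6]): A returns -12, B returns 0; on lastStoneWeightII1([3, -10, -6, -9, 0, 8]): A returns -14, B returns 0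
import Mathlib
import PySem

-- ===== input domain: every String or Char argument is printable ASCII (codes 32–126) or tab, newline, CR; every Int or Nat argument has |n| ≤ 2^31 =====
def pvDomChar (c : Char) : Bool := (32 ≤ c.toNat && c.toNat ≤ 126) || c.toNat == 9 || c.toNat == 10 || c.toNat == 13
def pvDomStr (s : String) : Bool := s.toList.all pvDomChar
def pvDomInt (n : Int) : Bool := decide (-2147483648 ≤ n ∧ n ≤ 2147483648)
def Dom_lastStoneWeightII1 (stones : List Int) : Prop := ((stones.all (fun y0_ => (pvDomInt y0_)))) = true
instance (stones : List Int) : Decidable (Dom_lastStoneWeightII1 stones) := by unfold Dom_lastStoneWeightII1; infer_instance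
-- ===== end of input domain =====

-- B replaces A's reverse-capacity dp array (min interleaved in the update) by a set of exactly-reachable
-- subset sums grown once per stone, extracting the answer in one separate final pass (objective: simpler).

-- ===== PORT A =====
def lastStoneWeightII1 (stones : List Int) : Int :=
  let target := stones.sum
  -- dp = [0] * (target+1); res = target; state (dp, res) threaded through both loops
  let st :=
    (PySem.List.pyRange 0 (stones.length) 1).foldl
      (fun (st : List Int × Int) i =>
        let w := PySem.List.pyGetD stones i 0        -- stones[i] (index in range for i in range(len(stones)))
        (PySem.List.pyRange target (w - 1) (-1)).foldl
          (fun (st : List Int × Int) j =>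
            let v := max (PySem.List.pyGetD st.1 j 0) (PySem.List.pyGetD st.1 (j - w) 0 + w)
            let dp := PySem.List.pySetD st.1 j v     -- dp[j] = max(dp[j], dp[j-stones[i]]+stones[i]); indices in range under Pre_
            let res := if target - 2 * v ≥ 0 then min st.2 (target - 2 * v) else st.2
            (dp, res))
          st)
      (PySem.List.pyRepeat [(0 : Int)] (target + 1), target)
  st.2

-- ===== PORT B =====
def lastStoneWeightII1_alt (stones : List Int) : Int :=
  let total := stones.sum
  let reach : PySem.Set Int :=
    stones.foldl (fun reach w => PySem.Set.union reach (reach.map (fun s => s + w)))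
      (PySem.Set.ofList [0])
  -- max(s for s in reach if 2*s <= total); nonempty under Pre_ (0 qualifies); .getD 0 is unreached there
  let best := (PySem.List.max? (reach.filter (fun s => decide (2 * s ≤ total))) (fun s => s)).getD 0
  total - 2 * best

-- ===== PRECONDITION & SPEC =====
-- Pre_ restricts to nonnegative stone weights — the problem's natural domain: on lists containing a
-- negative weight A variously raises IndexError or returns accidental values via an undersized dp
-- array and negative-index wraparound.
def Pre_lastStoneWeightII1 (stones : List Int) : Prop := ∀ s ∈ stones, 0 ≤ s
instance (stones : List Int) : Decidable (Pre_lastStoneWeightII1 stones) := by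
  unfold Pre_lastStoneWeightII1; infer_instance

def pvWitness_lastStoneWeightII1 : List Int := [2, 7, 4, 1, 8, 1]

def Spec_lastStoneWeightII1 (stones : List Int) (out : Int) : Prop := out = lastStoneWeightII1_alt stones
instance (stones : List Int) (out : Int) : Decidable (Spec_lastStoneWeightII1 stones out) := by unfold Spec_lastStoneWeightII1; infer_instance

-- ===== CLAIM (what is proved, stated in full; the proofs are below) =====
def Claim_equal_lastStoneWeightII1 : Prop := ∀ (stones : List Int), Dom_lastStoneWeightII1 stones → Pre_lastStoneWeightII1 stones → Spec_lastStoneWeightII1 stones (lastStoneWeightII1 stones)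

-- ===== LEMMAS AND PROOFS =====

-- All subset sums of ws (with multiplicity), in the prefix order A and B both traverse.
def pvSums (ws : List Int) : List Int := ws.foldl (fun r w => r ++ r.map (fun s => s + w)) [0]

-- pvM ws j = the largest subset sum of ws that is ≤ j (meaningful for 0 ≤ j).
def pvM (ws : List Int) (j : Int) : Int := ((pvSums ws).filter (fun s => decide (s ≤ j))).foldl max 0

theorem pvSums_append_singleton (p : List Int) (w : Int) :
    pvSums (p ++ [w]) = pvSums p ++ (pvSums p).map (fun s => s + w) := by
  simp [pvSums, List.foldl_append]

theorem mem_foldl_sums (ws : List Int) :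
    ∀ (acc : List Int) (x : Int), x ∈ acc →
      x ∈ ws.foldl (fun r w => r ++ r.map (fun s => s + w)) acc := by
  induction ws with
  | nil => intro acc x hx; simpa using hx
  | cons w ws ih =>
      intro acc x hx
      exact ih _ x (by simp [hx])

theorem zero_mem_pvSums (ws : List Int) : (0 : Int) ∈ pvSums ws :=
  mem_foldl_sums ws [0] 0 (by simp)

theorem pvM_mem {ws : List Int} {j : Int} : pvM ws j ∈ pvSums ws := by
  rcases PySem.List.foldl_max_mem ((pvSums ws).filter (fun s => decide (s ≤ j))) 0 with h | h
  · rw [pvM, h]; exact zero_mem_pvSums ws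
  · exact List.mem_of_mem_filter h

theorem pvM_le {ws : List Int} {j : Int} (hj : 0 ≤ j) : pvM ws j ≤ j := by
  rcases PySem.List.foldl_max_mem ((pvSums ws).filter (fun s => decide (s ≤ j))) 0 with h | h
  · rw [pvM, h]; exact hj
  · have := List.of_mem_filter h
    simpa using this

theorem le_pvM {ws : List Int} {j s : Int} (hs : s ∈ pvSums ws) (hsj : s ≤ j) : s ≤ pvM ws j := by
  have hmem : s ∈ (pvSums ws).filter (fun s => decide (s ≤ j)) :=
    List.mem_filter.mpr ⟨hs, by simpa using hsj⟩
  exact (PySem.List.le_foldl_max _ 0).2 s hmem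

theorem pvM_mono_of_subset {p q : List Int} {j : Int}
    (h : ∀ x, x ∈ pvSums p → x ∈ pvSums q) (hj : 0 ≤ j) : pvM p j ≤ pvM q j :=
  le_pvM (h _ pvM_mem) (pvM_le hj)

theorem pvM_rec {p : List Int} {w j : Int} (hw : 0 ≤ w) (hwj : w ≤ j) :
    pvM (p ++ [w]) j = max (pvM p j) (pvM p (j - w) + w) := by
  have hj : 0 ≤ j := le_trans hw hwj
  have hjw : 0 ≤ j - w := by omega
  apply le_antisymm
  · have hmem := pvM_mem (ws := p ++ [w]) (j := j)
    rw [pvSums_append_singleton] at hmem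
    rcases List.mem_append.mp hmem with hmem | hmem
    · exact le_max_of_le_left (le_pvM hmem (pvM_le hj))
    · rcases List.mem_map.mp hmem with ⟨s, hs, hsv⟩
      have hsle : s ≤ j - w := by
        have := pvM_le (ws := p ++ [w]) hj
        omega
      exact le_max_of_le_right (by have := le_pvM hs hsle; omega)
  · apply max_le
    · apply le_pvM _ (pvM_le hj)
      rw [pvSums_append_singleton]
      exact List.mem_append_left _ pvM_mem
    · apply le_pvM
      · rw [pvSums_append_singleton]
        exact List.mem_append_right _ (List.mem_map.mpr ⟨pvM p (j - w), pvM_mem, rfl⟩)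
      · have := pvM_le (ws := p) hjw
        omega

theorem pvM_low {p : List Int} {w k : Int} (hp : ∀ s ∈ pvSums p, 0 ≤ s)
    (hk : 0 ≤ k) (hkw : k < w) : pvM (p ++ [w]) k = pvM p k := by
  apply le_antisymm
  · have hmem := pvM_mem (ws := p ++ [w]) (j := k)
    rw [pvSums_append_singleton] at hmem
    rcases List.mem_append.mp hmem with hmem | hmem
    · exact le_pvM hmem (pvM_le hk)
    · rcases List.mem_map.mp hmem with ⟨s, hs, hsv⟩
      have h0 := hp s hs
      have := pvM_le (ws := p ++ [w]) hk
      omega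
  · apply le_pvM _ (pvM_le hk)
    rw [pvSums_append_singleton]
    exact List.mem_append_left _ pvM_mem

-- A's inner-loop body (dp-update + interleaved min), as folded over the countdown range.
def pvStepA (T w : Int) (st : List Int × Int) (j : Int) : List Int × Int :=
  let v := max (PySem.List.pyGetD st.1 j 0) (PySem.List.pyGetD st.1 (j - w) 0 + w)
  let dp := PySem.List.pySetD st.1 j v
  let res := if T - 2 * v ≥ 0 then min st.2 (T - 2 * v) else st.2
  (dp, res)

theorem portA_unfold (stones : List Int) :
    lastStoneWeightII1 stones =
      ((PySem.List.pyRange 0 (stones.length) 1).foldl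
        (fun st i =>
          (PySem.List.pyRange stones.sum (PySem.List.pyGetD stones i 0 - 1) (-1)).foldl
            (pvStepA stones.sum (PySem.List.pyGetD stones i 0)) st)
        (PySem.List.pyRepeat [(0 : Int)] (stones.sum + 1), stones.sum)).2 := rfl

theorem pvGetSet (xs : List Int) (j k v : Int) (hj0 : 0 ≤ j)
    (hk0 : 0 ≤ k) (hk1 : k < (xs.length : Int)) :
    PySem.List.pyGetD (PySem.List.pySetD xs j v) k 0 =
      if k = j then v else PySem.List.pyGetD xs k 0 := by
  rw [PySem.List.pySetD_of_nonneg xs v hj0]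
  rw [PySem.List.pyGetD_eq_getElem _ 0 hk0 (by simpa using hk1),
      PySem.List.pyGetD_eq_getElem xs 0 hk0 hk1]
  rw [List.getElem_set]
  by_cases h : k = j
  · simp [h]
  · have : j.toNat ≠ k.toNat := by omega
    simp [this, h]

theorem pvInner (T w : Int) (p : List Int) (hw : 0 ≤ w) (hT : 0 ≤ T) :
    ∀ (n : Nat) (dp : List Int) (res : Int),
      w - 1 + n ≤ T →
      dp.length = (T + 1).toNat →
      (∀ k : Int, 0 ≤ k → k ≤ T → PySem.List.pyGetD dp k 0 =
        (if w - 1 + n < k then pvM (p ++ [w]) k else pvM p k)) →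
      T - 2 * pvM (p ++ [w]) (T / 2) ≤ res →
      (res ≤ T - 2 * pvM (p ++ [w]) (T / 2) ∨
        (w ≤ pvM (p ++ [w]) (T / 2) ∧ pvM (p ++ [w]) (T / 2) ≤ w - 1 + n)) →
      ((PySem.List.pyRange (w - 1 + n) (w - 1) (-1)).foldl (pvStepA T w) (dp, res)).1.length
          = (T + 1).toNat ∧
      (∀ k : Int, 0 ≤ k → k ≤ T →
        PySem.List.pyGetD ((PySem.List.pyRange (w - 1 + n) (w - 1) (-1)).foldl (pvStepA T w) (dp, res)).1 k 0 =
          (if w - 1 < k then pvM (p ++ [w]) k else pvM p k)) ∧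
      ((PySem.List.pyRange (w - 1 + n) (w - 1) (-1)).foldl (pvStepA T w) (dp, res)).2
          = T - 2 * pvM (p ++ [w]) (T / 2) := by
  have hB0 : (0 : Int) ≤ T / 2 := Int.ediv_nonneg hT (by norm_num)
  have h2B : 2 * pvM (p ++ [w]) (T / 2) ≤ T := by
    have := (Int.le_ediv_iff_mul_le (a := pvM (p ++ [w]) (T / 2)) (b := T)
      (by norm_num : (0:Int) < 2)).mp (pvM_le hB0)
    omega
  intro n
  induction n with
  | zero =>
      intro dp res h1 h2 h3 h4 h5
      have hnil : PySem.List.pyRange (w - 1 + ((0:Nat):Int)) (w - 1) (-1) = [] :=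
        PySem.List.pyRange_neg_one_eq_nil (by omega)
      rw [hnil]
      refine ⟨h2, ?_, ?_⟩
      · intro k hk0 hkT
        have := h3 k hk0 hkT
        simpa using this
      · rcases h5 with h5 | ⟨hwB, hB⟩
        · exact le_antisymm h5 h4
        · omega
  | succ n ih =>
      intro dp res h1 h2 h3 h4 h5
      have hj0 : (0:Int) ≤ w - 1 + ((n:Int) + 1) := by omega
      have hjT : w - 1 + ((n:Int) + 1) ≤ T := by push_cast at h1 ⊢; omega
      have hcons : PySem.List.pyRange (w - 1 + (((n:Nat)+1 : Nat):Int)) (w - 1) (-1) =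
          (w - 1 + ((n:Int) + 1)) :: PySem.List.pyRange (w - 1 + (n:Int)) (w - 1) (-1) := by
        have h := PySem.List.pyRange_neg_one_cons
          (a := w - 1 + ((n:Int) + 1)) (b := w - 1) (by omega)
        have harg : w - 1 + ((n:Int) + 1) - 1 = w - 1 + (n:Int) := by ring
        rw [harg] at h
        have hcast : (((n:Nat)+1 : Nat):Int) = (n:Int) + 1 := by push_cast; ring
        rw [hcast]
        exact h
      set jj : Int := w - 1 + ((n:Int) + 1) with hjj
      have hwjj : w ≤ jj := by omega
      -- the value Python writes at dp[jj]
      set v : Int := max (PySem.List.pyGetD dp jj 0) (PySem.List.pyGetD dp (jj - w) 0 + w) with hvdef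
      have hget1 : PySem.List.pyGetD dp jj 0 = pvM p jj := by
        have := h3 jj hj0 hjT
        rw [if_neg (by push_cast; omega)] at this
        exact this
      have hget2 : PySem.List.pyGetD dp (jj - w) 0 = pvM p (jj - w) := by
        have := h3 (jj - w) (by omega) (by omega)
        rw [if_neg (by push_cast; omega)] at this
        exact this
      have hv : v = pvM (p ++ [w]) jj := by
        rw [hvdef, hget1, hget2, pvM_rec hw hwjj]
      set res' : Int := if T - 2 * v ≥ 0 then min res (T - 2 * v) else res with hres'
      have hstep : pvStepA T w (dp, res) jj = (PySem.List.pySetD dp jj v, res') := rfl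
      have hlenInt : ((dp.length : Int)) = T + 1 := by
        rw [h2]; omega
      have hlen' : (PySem.List.pySetD dp jj v).length = (T + 1).toNat := by
        rw [PySem.List.length_pySetD dp jj v]; exact h2
      have hdp' : ∀ k : Int, 0 ≤ k → k ≤ T →
          PySem.List.pyGetD (PySem.List.pySetD dp jj v) k 0 =
            (if w - 1 + (n:Int) < k then pvM (p ++ [w]) k else pvM p k) := by
        intro k hk0 hkT
        rw [pvGetSet dp jj k v hj0 hk0 (by omega)]
        by_cases hk : k = jj
        · rw [if_pos hk, hk, hv, if_pos (by omega)]
        · rw [if_neg hk]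
          have := h3 k hk0 hkT
          rw [this]
          by_cases hlt : w - 1 + (n:Int) < k
          · rw [if_pos hlt, if_pos (by push_cast; omega)]
          · rw [if_neg hlt, if_neg (by push_cast; omega)]
      have hvmem : v ∈ pvSums (p ++ [w]) := by rw [hv]; exact pvM_mem
      have hlow' : T - 2 * pvM (p ++ [w]) (T / 2) ≤ res' := by
        rw [hres']
        split_ifs with hg
        · have hvle : v ≤ T / 2 :=
            (Int.le_ediv_iff_mul_le (by norm_num : (0:Int) < 2)).mpr (by omega)
          have : v ≤ pvM (p ++ [w]) (T / 2) := le_pvM hvmem hvle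
          exact le_min h4 (by omega)
        · exact h4
      have hdisj' : res' ≤ T - 2 * pvM (p ++ [w]) (T / 2) ∨
          (w ≤ pvM (p ++ [w]) (T / 2) ∧ pvM (p ++ [w]) (T / 2) ≤ w - 1 + (n:Int)) := by
        rcases h5 with h5 | ⟨hwB, hBj⟩
        · left
          have : res' ≤ res := by rw [hres']; split_ifs; exacts [min_le_left _ _, le_rfl]
          omega
        · by_cases hBsm : pvM (p ++ [w]) (T / 2) ≤ w - 1 + (n:Int)
          · exact Or.inr ⟨hwB, hBsm⟩
          · left
            have hBeq : pvM (p ++ [w]) (T / 2) = jj := by push_cast at hBj; omega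
            have hveq : v = pvM (p ++ [w]) (T / 2) := by
              rw [hv]
              apply le_antisymm
              · have := pvM_le (ws := p ++ [w]) (j := jj) (by omega)
                omega
              · exact le_pvM pvM_mem (le_of_eq hBeq)
            rw [hres', hveq, if_pos (by omega)]
            exact min_le_right _ _
      have := ih (PySem.List.pySetD dp jj v) res' (by push_cast at h1 ⊢; omega) hlen' hdp' hlow' hdisj'
      rw [hcons, List.foldl_cons, hstep]
      exact this

theorem pvOuter (T : Int) (hT : 0 ≤ T) :
    ∀ (q p : List Int) (dp : List Int) (res : Int),
      (∀ w ∈ q, 0 ≤ w ∧ w ≤ T) →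
      (∀ s ∈ pvSums p, 0 ≤ s) →
      dp.length = (T + 1).toNat →
      (∀ k : Int, 0 ≤ k → k ≤ T → PySem.List.pyGetD dp k 0 = pvM p k) →
      res = T - 2 * pvM p (T / 2) →
      (q.foldl (fun st ww =>
          (PySem.List.pyRange T (ww - 1) (-1)).foldl (pvStepA T ww) st) (dp, res)).2
        = T - 2 * pvM (p ++ q) (T / 2) := by
  have hB0 : (0 : Int) ≤ T / 2 := Int.ediv_nonneg hT (by norm_num)
  intro q
  induction q with
  | nil =>
      intro p dp res _ _ _ _ hres
      simpa using hres
  | cons w q ih =>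
      intro p dp res hq hp hlen hdp hres
      have hw : 0 ≤ w := (hq w (by simp)).1
      have hwT : w ≤ T := (hq w (by simp)).2
      have hsub : ∀ x, x ∈ pvSums p → x ∈ pvSums (p ++ [w]) := by
        intro x hx
        rw [pvSums_append_singleton]
        exact List.mem_append_left _ hx
      -- entry facts for the inner loop at j = T (n = (T - w + 1).toNat)
      set B : Int := pvM (p ++ [w]) (T / 2) with hBdef
      have h2B : 2 * B ≤ T := by
        have := (Int.le_ediv_iff_mul_le (a := B) (b := T)
          (by norm_num : (0:Int) < 2)).mp (pvM_le hB0)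
        omega
      set n : Nat := (T - w + 1).toNat with hn
      have hwn : w - 1 + (n : Int) = T := by omega
      have hdp0 : ∀ k : Int, 0 ≤ k → k ≤ T → PySem.List.pyGetD dp k 0 =
          (if w - 1 + (n:Int) < k then pvM (p ++ [w]) k else pvM p k) := by
        intro k hk0 hkT
        rw [if_neg (by omega)]
        exact hdp k hk0 hkT
      have hlow : T - 2 * B ≤ res := by
        rw [hres]
        have := pvM_mono_of_subset hsub hB0
        omega
      have hdisj : res ≤ T - 2 * B ∨ (w ≤ B ∧ B ≤ w - 1 + (n:Int)) := by
        have hBmem : B ∈ pvSums (p ++ [w]) := pvM_mem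
        rw [pvSums_append_singleton] at hBmem
        rcases List.mem_append.mp hBmem with hm | hm
        · left
          have h1 : B ≤ pvM p (T / 2) := le_pvM hm (pvM_le hB0)
          omega
        · right
          rcases List.mem_map.mp hm with ⟨s, hs, hsv⟩
          have h0s := hp s hs
          refine ⟨by omega, ?_⟩
          have := pvM_le (ws := p ++ [w]) hB0
          omega
      have hstep := pvInner T w p hw hT n dp res (by omega) hlen hdp0 hlow hdisj
      rw [hwn] at hstep
      obtain ⟨hlen1, hdp1, hres1⟩ := hstep
      have hp' : ∀ s ∈ pvSums (p ++ [w]), 0 ≤ s := by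
        intro s hs
        rw [pvSums_append_singleton] at hs
        rcases List.mem_append.mp hs with hm | hm
        · exact hp s hm
        · rcases List.mem_map.mp hm with ⟨t, ht, rfl⟩
          have := hp t ht
          omega
      have hdp1' : ∀ k : Int, 0 ≤ k → k ≤ T →
          PySem.List.pyGetD
            ((PySem.List.pyRange T (w - 1) (-1)).foldl (pvStepA T w) (dp, res)).1 k 0 =
            pvM (p ++ [w]) k := by
        intro k hk0 hkT
        rw [hdp1 k hk0 hkT]
        by_cases hlt : w - 1 < k
        · rw [if_pos hlt]
        · rw [if_neg hlt, ← pvM_low (p := p) (w := w) hp hk0 (by omega)]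
      have := ih (p ++ [w])
        ((PySem.List.pyRange T (w - 1) (-1)).foldl (pvStepA T w) (dp, res)).1
        ((PySem.List.pyRange T (w - 1) (-1)).foldl (pvStepA T w) (dp, res)).2
        (fun x hx => hq x (by simp [hx])) hp' hlen1 hdp1' hres1
      rw [List.foldl_cons]
      rw [show (p ++ [w]) ++ q = p ++ w :: q by simp]  at this
      exact this

theorem pvM_nil {k : Int} (hk : 0 ≤ k) : pvM [] k = 0 := by
  simp [pvM, pvSums, hk]

theorem pvA_eq (stones : List Int) (hpre : Pre_lastStoneWeightII1 stones) :
    lastStoneWeightII1 stones = stones.sum - 2 * pvM stones (stones.sum / 2) := by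
  have hnn : ∀ x ∈ stones, 0 ≤ x := hpre
  have hT : (0 : Int) ≤ stones.sum := List.sum_nonneg hnn
  rw [portA_unfold]
  rw [PySem.List.foldl_pyRange_zero_pyGetD' stones 0
    (fun st w => (PySem.List.pyRange stones.sum (w - 1) (-1)).foldl (pvStepA stones.sum w) st)
    (PySem.List.pyRepeat [(0 : Int)] (stones.sum + 1), stones.sum)]
  have h := pvOuter stones.sum hT stones []
    (PySem.List.pyRepeat [(0 : Int)] (stones.sum + 1)) stones.sum
    (fun w hw => ⟨hnn w hw, List.single_le_sum hnn w hw⟩)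
    (by intro s hs; simp [pvSums] at hs; omega)
    (by rw [PySem.List.pyRepeat_singleton]; simp)
    (by
      intro k hk0 hkT
      rw [PySem.List.pyRepeat_singleton]
      rw [PySem.List.pyGetD_eq_getElem _ 0 hk0 (by simp; omega)]
      simp [pvM_nil hk0])
    (by rw [pvM_nil (Int.ediv_nonneg hT (by norm_num))]; ring)
  simpa using h

theorem pvReach_aux :
    ∀ (q : List Int) (r acc : List Int), (∀ x : Int, x ∈ r ↔ x ∈ acc) →
      ∀ x : Int,
        (x ∈ q.foldl (fun reach ww => PySem.Set.union reach (reach.map (fun s => s + ww))) r ↔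
         x ∈ q.foldl (fun r ww => r ++ r.map (fun s => s + ww)) acc) := by
  intro q
  induction q with
  | nil => intro r acc h x; simpa using h x
  | cons ww q ih =>
      intro r acc h x
      apply ih
      intro y
      rw [PySem.Set.mem_union, List.mem_append, List.mem_map, List.mem_map]
      constructor
      · rintro (hy | ⟨s, hs, rfl⟩)
        · exact Or.inl ((h y).mp hy)
        · exact Or.inr ⟨s, (h s).mp hs, rfl⟩
      · rintro (hy | ⟨s, hs, rfl⟩)
        · exact Or.inl ((h y).mpr hy)
        · exact Or.inr ⟨s, (h s).mpr hs, rfl⟩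

theorem pvReach_mem (stones : List Int) (x : Int) :
    x ∈ stones.foldl (fun reach ww => PySem.Set.union reach (reach.map (fun s => s + ww)))
        (PySem.Set.ofList [0]) ↔ x ∈ pvSums stones := by
  exact pvReach_aux stones (PySem.Set.ofList [0]) [0] (by simp [PySem.Set.mem_ofList]) x

theorem pvB_eq (stones : List Int) (hpre : Pre_lastStoneWeightII1 stones) :
    lastStoneWeightII1_alt stones = stones.sum - 2 * pvM stones (stones.sum / 2) := by
  have hT : (0 : Int) ≤ stones.sum := List.sum_nonneg hpre
  have hB0 : (0 : Int) ≤ stones.sum / 2 := Int.ediv_nonneg hT (by norm_num)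
  have h2B : 2 * pvM stones (stones.sum / 2) ≤ stones.sum := by
    have := (Int.le_ediv_iff_mul_le (a := pvM stones (stones.sum / 2)) (b := stones.sum)
      (by norm_num : (0:Int) < 2)).mp (pvM_le hB0)
    omega
  have hrfl : lastStoneWeightII1_alt stones =
      stones.sum - 2 * ((PySem.List.max?
        ((stones.foldl (fun reach w => PySem.Set.union reach (reach.map (fun s => s + w)))
            (PySem.Set.ofList [0])).filter (fun s => decide (2 * s ≤ stones.sum)))
        (fun s => s)).getD 0) := rfl
  set L := (stones.foldl (fun reach w => PySem.Set.union reach (reach.map (fun s => s + w)))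
      (PySem.Set.ofList [0])).filter (fun s => decide (2 * s ≤ stones.sum)) with hL
  have hmemL : ∀ x : Int, x ∈ L ↔ (x ∈ pvSums stones ∧ 2 * x ≤ stones.sum) := by
    intro x
    rw [hL, List.mem_filter, pvReach_mem]
    simp
  have h0L : (0 : Int) ∈ L := (hmemL 0).mpr ⟨zero_mem_pvSums _, by omega⟩
  obtain ⟨m, hm⟩ : ∃ m, PySem.List.max? L (fun s => s) = some m := by
    cases h : PySem.List.max? L (fun s => s) with
    | none =>
        rw [PySem.List.max?_eq_none_iff] at h
        rw [h] at h0L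
        simp at h0L
    | some m => exact ⟨m, rfl⟩
  have hmeq : m = pvM stones (stones.sum / 2) := by
    apply le_antisymm
    · have hmmem := (hmemL m).mp (PySem.List.max?_mem hm)
      exact le_pvM hmmem.1
        ((Int.le_ediv_iff_mul_le (by norm_num : (0:Int) < 2)).mpr (by omega))
    · exact PySem.List.max?_isMax hm _ ((hmemL _).mpr ⟨pvM_mem, h2B⟩)
  rw [hrfl, hm]
  simp [hmeq]

-- ===== VERDICT (by name: the statement is the Claim_ definition above) =====
theorem lastStoneWeightII1_spec : Claim_equal_lastStoneWeightII1 := by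
  intro stones _ hpre
  unfold Spec_lastStoneWeightII1
  rw [pvA_eq stones hpre, pvB_eq stones hpre]
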